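-- pv_equiv track=rewrite | github.com/Aashisho1o1/Owen | backend/services/indexing/hybrid_indexer.py | _summarize_character_arc
-- ===== SOURCE A (Python) =====
-- from typing import List, Dict, Any, Optional, Tuple
--
-- def _summarize_character_arc(arc: List[Dict]) -> str:
--     """Summarize a character's arc"""
--     if not arc:
--         return "No significant events found"
--
--     # Group by relationship type
--     interactions = [a for a in arc if a['type'] in ['SPEAKS_TO', 'MEETS', 'FEELS_ABOUT']]
--     movements = [a for a in arc if a['type'] in ['GOES_TO', 'LIVES_IN']]
--     events = [a for a in arc if a['type'] in ['CAUSES', 'PARTICIPATES_IN']]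
--
--     summary_parts = []
--     if interactions:
--         summary_parts.append(f"{len(interactions)} character interactions")
--     if movements:
--         summary_parts.append(f"{len(movements)} location changes")
--     if events:
--         summary_parts.append(f"{len(events)} plot events")
--
--     return f"Character involved in: {', '.join(summary_parts)}"
-- ===== SOURCE B (Python) =====
-- def _summarize_character_arc(arc):
--     """Summarize a character's arc (one pass over arc with a category table)."""
--     if not arc:
--         return "No significant events found"
--
--     CATEGORY = {'SPEAKS_TO': 0, 'MEETS': 0, 'FEELS_ABOUT': 0,
--                 'GOES_TO': 1, 'LIVES_IN': 1,
--                 'CAUSES': 2, 'PARTICIPATES_IN': 2}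
--     n_inter = 0
--     n_move = 0
--     n_event = 0
--     for a in arc:
--         c = CATEGORY.get(a['type'])
--         if c == 0:
--             n_inter += 1
--         elif c == 1:
--             n_move += 1
--         elif c == 2:
--             n_event += 1
--
--     parts = []
--     if n_inter:
--         parts.append(f"{n_inter} character interactions")
--     if n_move:
--         parts.append(f"{n_move} location changes")
--     if n_event:
--         parts.append(f"{n_event} plot events")
--     return f"Character involved in: {', '.join(parts)}"
-- ===== Notes on version B (the rewrite author's own statement) =====
-- stated objective: alternative
-- what changed: Replaces A's three separate filtering passes (each building an intermediate list via membership tests on literal lists) by a single pass over arc that increments one of three counters chosen by a precomputed event-type-to-category dict lookup.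
import Mathlib
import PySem

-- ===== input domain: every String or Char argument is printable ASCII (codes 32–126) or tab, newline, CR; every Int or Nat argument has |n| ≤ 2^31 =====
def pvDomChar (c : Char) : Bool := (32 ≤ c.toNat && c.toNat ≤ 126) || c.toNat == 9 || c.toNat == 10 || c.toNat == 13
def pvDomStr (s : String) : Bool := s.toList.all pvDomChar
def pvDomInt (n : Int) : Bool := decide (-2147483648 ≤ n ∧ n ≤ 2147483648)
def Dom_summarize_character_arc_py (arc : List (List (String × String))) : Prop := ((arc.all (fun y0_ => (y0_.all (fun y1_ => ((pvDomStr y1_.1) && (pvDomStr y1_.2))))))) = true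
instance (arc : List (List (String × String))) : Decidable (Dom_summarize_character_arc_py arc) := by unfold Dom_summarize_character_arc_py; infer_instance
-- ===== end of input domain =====

-- B replaces A's three filtering passes by one pass over arc incrementing category counters via a lookup table; return values agree on Pre_.

-- shared helper: a['type'] as first-match lookup in the association list (Pre_ guarantees the key is present)
def pvGetType (a : List (String × String)) : String :=
  ((a.find? (fun p => p.1 == "type")).map (·.2)).getD ""

-- ===== PORT A =====
def summarize_character_arc_py (arc : List (List (String × String))) : String :=
  if arc.isEmpty then "No significant events found"
  else
    let interactions := arc.filter (fun a => decide (pvGetType a ∈ (["SPEAKS_TO", "MEETS", "FEELS_ABOUT"] : List String)))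
    let movements := arc.filter (fun a => decide (pvGetType a ∈ (["GOES_TO", "LIVES_IN"] : List String)))
    let events := arc.filter (fun a => decide (pvGetType a ∈ (["CAUSES", "PARTICIPATES_IN"] : List String)))
    let parts : List String :=
      (if interactions.isEmpty then [] else [PySem.Int.toStr (interactions.length : Int) ++ " character interactions"]) ++
      (if movements.isEmpty then [] else [PySem.Int.toStr (movements.length : Int) ++ " location changes"]) ++
      (if events.isEmpty then [] else [PySem.Int.toStr (events.length : Int) ++ " plot events"])
    "Character involved in: " ++ PySem.Str.join ", " parts

-- ===== PORT B =====
def pvCategory : PySem.Dict String Int :=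
  PySem.Dict.ofList [("SPEAKS_TO", 0), ("MEETS", 0), ("FEELS_ABOUT", 0),
                     ("GOES_TO", 1), ("LIVES_IN", 1), ("CAUSES", 2), ("PARTICIPATES_IN", 2)]

def pvStep (s : Int × Int × Int) (a : List (String × String)) : Int × Int × Int :=
  match PySem.Dict.get? pvCategory (pvGetType a) with
  | some 0 => (s.1 + 1, s.2.1, s.2.2)
  | some 1 => (s.1, s.2.1 + 1, s.2.2)
  | some 2 => (s.1, s.2.1, s.2.2 + 1)
  | _ => s

def summarize_character_arc_py_alt (arc : List (List (String × String))) : String :=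
  if arc.isEmpty then "No significant events found"
  else
    let c := arc.foldl pvStep (0, 0, 0)
    let parts : List String :=
      (if c.1 ≠ 0 then [PySem.Int.toStr c.1 ++ " character interactions"] else []) ++
      (if c.2.1 ≠ 0 then [PySem.Int.toStr c.2.1 ++ " location changes"] else []) ++
      (if c.2.2 ≠ 0 then [PySem.Int.toStr c.2.2 ++ " plot events"] else [])
    "Character involved in: " ++ PySem.Str.join ", " parts

-- ===== PRECONDITION & SPEC =====
-- Pre_ excludes inputs where some event dict lacks the 'type' key: there A raises KeyError.
def Pre_summarize_character_arc_py (arc : List (List (String × String))) : Prop :=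
  ∀ a ∈ arc, (a.any (fun p => p.1 == "type")) = true
instance (arc : List (List (String × String))) : Decidable (Pre_summarize_character_arc_py arc) := by unfold Pre_summarize_character_arc_py; infer_instance
def pvWitness_summarize_character_arc_py : (List (List (String × String))) :=
  [[("type", "SPEAKS_TO")], [("type", "GOES_TO")], [("type", "UNKNOWN")]]
def Spec_summarize_character_arc_py (arc : List (List (String × String))) (out : String) : Prop := out = summarize_character_arc_py_alt arc
instance (arc : List (List (String × String))) (out : String) : Decidable (Spec_summarize_character_arc_py arc out) := by unfold Spec_summarize_character_arc_py; infer_instance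

-- ===== CLAIM (what is proved, stated in full; the proofs are below) =====
def Claim_equal_summarize_character_arc_py : Prop := ∀ (arc : List (List (String × String))), Dom_summarize_character_arc_py arc → Pre_summarize_character_arc_py arc → Spec_summarize_character_arc_py arc (summarize_character_arc_py arc)

-- ===== LEMMAS AND PROOFS =====
set_option maxHeartbeats 1000000 in
lemma pvCat_class (t : String) :
    PySem.Dict.get? pvCategory t =
      if t ∈ (["SPEAKS_TO", "MEETS", "FEELS_ABOUT"] : List String) then some 0
      else if t ∈ (["GOES_TO", "LIVES_IN"] : List String) then some 1
      else if t ∈ (["CAUSES", "PARTICIPATES_IN"] : List String) then some 2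
      else none := by
  have h : pvCategory = PySem.Dict.mk [("SPEAKS_TO", 0), ("MEETS", 0), ("FEELS_ABOUT", 0),
      ("GOES_TO", 1), ("LIVES_IN", 1), ("CAUSES", 2), ("PARTICIPATES_IN", 2)] := rfl
  rw [h]
  by_cases h1 : t = "SPEAKS_TO"
  · subst h1; decide
  by_cases h2 : t = "MEETS"
  · subst h2; decide
  by_cases h3 : t = "FEELS_ABOUT"
  · subst h3; decide
  by_cases h4 : t = "GOES_TO"
  · subst h4; decide
  by_cases h5 : t = "LIVES_IN"
  · subst h5; decide
  by_cases h6 : t = "CAUSES"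
  · subst h6; decide
  by_cases h7 : t = "PARTICIPATES_IN"
  · subst h7; decide
  simp [pysem, PySem.Dict.get?_mk_cons, beq_iff_eq,
        Ne.symm h1, Ne.symm h2, Ne.symm h3, Ne.symm h4, Ne.symm h5, Ne.symm h6, Ne.symm h7,
        h1, h2, h3, h4, h5, h6, h7]

lemma pvStep_eq (s : Int × Int × Int) (a : List (String × String)) :
    pvStep s a =
      (s.1 + (if pvGetType a ∈ (["SPEAKS_TO", "MEETS", "FEELS_ABOUT"] : List String) then 1 else 0),
       s.2.1 + (if pvGetType a ∈ (["GOES_TO", "LIVES_IN"] : List String) then 1 else 0),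
       s.2.2 + (if pvGetType a ∈ (["CAUSES", "PARTICIPATES_IN"] : List String) then 1 else 0)) := by
  unfold pvStep
  rw [pvCat_class]
  by_cases h1 : pvGetType a ∈ (["SPEAKS_TO", "MEETS", "FEELS_ABOUT"] : List String)
  · have h2 : pvGetType a ∉ (["GOES_TO", "LIVES_IN"] : List String) := by
      simp only [List.mem_cons, List.not_mem_nil, or_false] at h1 ⊢
      rcases h1 with h | h | h <;> simp [h]
    have h3 : pvGetType a ∉ (["CAUSES", "PARTICIPATES_IN"] : List String) := by
      simp only [List.mem_cons, List.not_mem_nil, or_false] at h1 ⊢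
      rcases h1 with h | h | h <;> simp [h]
    simp [h1, h2, h3]
  · by_cases h2 : pvGetType a ∈ (["GOES_TO", "LIVES_IN"] : List String)
    · have h3 : pvGetType a ∉ (["CAUSES", "PARTICIPATES_IN"] : List String) := by
        simp only [List.mem_cons, List.not_mem_nil, or_false] at h2 ⊢
        rcases h2 with h | h <;> simp [h]
      simp [h1, h2, h3]
    · by_cases h3 : pvGetType a ∈ (["CAUSES", "PARTICIPATES_IN"] : List String)
      · simp [h1, h2, h3]
      · simp [h1, h2, h3]

lemma pvFold_eq (arc : List (List (String × String))) (i m e : Int) :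
    arc.foldl pvStep (i, m, e) =
      (i + (arc.countP (fun a => decide (pvGetType a ∈ (["SPEAKS_TO", "MEETS", "FEELS_ABOUT"] : List String))) : Int),
       m + (arc.countP (fun a => decide (pvGetType a ∈ (["GOES_TO", "LIVES_IN"] : List String))) : Int),
       e + (arc.countP (fun a => decide (pvGetType a ∈ (["CAUSES", "PARTICIPATES_IN"] : List String))) : Int)) := by
  induction arc generalizing i m e with
  | nil => simp
  | cons a rest ih =>
    rw [List.foldl_cons, pvStep_eq, ih]
    simp only [List.countP_cons, decide_eq_true_eq, Prod.mk.injEq]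
    refine ⟨?_, ?_, ?_⟩ <;> (split_ifs with h <;> push_cast <;> omega)

lemma pvPart_eq (arc : List (List (String × String))) (p : List (String × String) → Bool) (lbl : String) :
    (if (arc.filter p).isEmpty then ([] : List String)
     else [PySem.Int.toStr ((arc.filter p).length : Int) ++ lbl]) =
    (if ((0 : Int) + (arc.countP p : Int)) ≠ 0 then [PySem.Int.toStr ((0 : Int) + (arc.countP p : Int)) ++ lbl]
     else []) := by
  by_cases hp : (arc.filter p) = []
  · simp [hp, List.countP_eq_length_filter]
  · have hlen : (arc.filter p).length ≠ 0 := by simpa [List.length_eq_zero_iff] using hp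
    simp [hp, List.countP_eq_length_filter, List.isEmpty_iff, hlen]

-- ===== VERDICT (by name: the statement is the Claim_ definition above) =====
theorem summarize_character_arc_py_spec : Claim_equal_summarize_character_arc_py := by
  intro arc _ _
  unfold Spec_summarize_character_arc_py summarize_character_arc_py summarize_character_arc_py_alt
  by_cases h : arc.isEmpty
  · simp [h]
  · simp only [h, if_false, Bool.false_eq_true]
    rw [pvFold_eq]
    rw [← pvPart_eq, ← pvPart_eq, ← pvPart_eq]
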